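-- pv_equiv track=rewrite | github.com/21school-Dwulfe/Django_piscine | day01/ex04/state.py | read_from_dict
-- ===== SOURCE A (Python) =====
-- def get_key_from_value(dict: dict, value):
--     for key, item in dict.items():
--         if item == value:
--             return key
--     return None
--
-- def read_from_dict(key : str):
--     states = {
--         "Oregon": "OR",
--         "Alabama": "AL",
--         "New Jersey": "NJ",
--         "Colorado": "CO"
--     }
--
--     capital_cities = {
--         "OR": "Salem",
--         "AL": "Montgomery",
--         "NJ": "Trenton",
--         "CO": "Denver"
--     }
--     arr = key.split()
--     key = " ".join([item.lower().capitalize() for item in arr])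
--     v = get_key_from_value(capital_cities, key.strip())
--     if v:
--         return get_key_from_value(states, v)
--     return ("Unknown capital city ")
-- ===== SOURCE B (Python) =====
-- _CAPITAL_TO_STATE = {
--     "Salem": "Oregon",
--     "Montgomery": "Alabama",
--     "Trenton": "New Jersey",
--     "Denver": "Colorado",
-- }
--
-- def read_from_dict(key: str):
--     normalized = " ".join(word.capitalize() for word in key.split())
--     return _CAPITAL_TO_STATE.get(normalized, "Unknown capital city ")
-- ===== Notes on version B (the rewrite author's own statement) =====
-- stated objective: simpler
-- what changed: Replaces A's two chained reverse linear scans (value->key over capital_cities, then value->key over states via get_key_from_value) and the None-truthiness branch with a single precomputed capital->state table consulted once with .get and a default.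
import Mathlib
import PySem

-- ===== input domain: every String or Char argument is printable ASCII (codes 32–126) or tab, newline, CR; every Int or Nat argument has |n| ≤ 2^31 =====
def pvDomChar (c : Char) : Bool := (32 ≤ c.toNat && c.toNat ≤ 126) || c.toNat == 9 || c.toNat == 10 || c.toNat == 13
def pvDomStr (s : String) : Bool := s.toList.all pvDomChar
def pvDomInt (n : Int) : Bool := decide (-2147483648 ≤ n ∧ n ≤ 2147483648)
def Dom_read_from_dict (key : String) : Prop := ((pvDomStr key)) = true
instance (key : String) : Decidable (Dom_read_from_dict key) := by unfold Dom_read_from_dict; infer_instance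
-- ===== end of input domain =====

-- B replaces A's two chained reverse scans with one precomputed capital->state table (simpler).

-- ===== PORT A =====

-- str.capitalize(): first char uppercased, the rest lowercased (exact on ASCII)
def pyCapitalizeChars (cs : List Char) : List Char :=
  match cs with
  | [] => []
  | c :: rest => PySem.Chars.upperChar c :: rest.map PySem.Chars.lowerChar

def pyCapitalize (s : String) : String := String.ofList (pyCapitalizeChars s.toList)

def get_key_from_value (d : List (String × String)) (value : String) : Option String :=
  match d with
  | [] => none
  | (k, item) :: rest => if item == value then some k else get_key_from_value rest value

def read_from_dict (key : String) : String :=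
  let states : List (String × String) :=
    [("Oregon", "OR"), ("Alabama", "AL"), ("New Jersey", "NJ"), ("Colorado", "CO")]
  let capital_cities : List (String × String) :=
    [("OR", "Salem"), ("AL", "Montgomery"), ("NJ", "Trenton"), ("CO", "Denver")]
  let arr := PySem.Str.split₀ key
  let key2 := PySem.Str.join " " (arr.map (fun item => pyCapitalize (PySem.Str.lower item)))
  match get_key_from_value capital_cities (PySem.Str.strip key2) with
  | some v =>
      if v == "" then "Unknown capital city "
      -- inner lookup cannot miss: v is always a value of states; Python would return None there
      else (get_key_from_value states v).getD ""
  | none => "Unknown capital city "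

-- ===== PORT B =====

def capitalToState : PySem.Dict String String :=
  PySem.Dict.ofList
    [("Salem", "Oregon"), ("Montgomery", "Alabama"), ("Trenton", "New Jersey"), ("Denver", "Colorado")]

def read_from_dict_alt (key : String) : String :=
  let normalized := PySem.Str.join " " ((PySem.Str.split₀ key).map pyCapitalize)
  PySem.Dict.getD capitalToState normalized "Unknown capital city "

-- ===== PRECONDITION & SPEC =====
def Spec_read_from_dict (key : String) (out : String) : Prop := out = read_from_dict_alt key
instance (key : String) (out : String) : Decidable (Spec_read_from_dict key out) := by unfold Spec_read_from_dict; infer_instance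

-- ===== CLAIM (what is proved, stated in full; the proofs are below) =====
def Claim_equal_read_from_dict : Prop := ∀ (key : String), Dom_read_from_dict key → Spec_read_from_dict key (read_from_dict key)


-- ===== LEMMAS AND PROOFS =====

theorem toNat_ofNat_valid (n : Nat) (h : Nat.isValidChar n) : (Char.ofNat n).toNat = n := by
  unfold Char.ofNat
  split
  · rfl
  · exact absurd h (by assumption)

theorem le_iff_toNat (a b : Char) : a ≤ b ↔ a.toNat ≤ b.toNat := by
  rw [Char.le_def]
  exact ⟨fun h => by exact_mod_cast h, fun h => by exact_mod_cast h⟩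

theorem lowerChar_eq (c : Char) :
    PySem.Chars.lowerChar c =
      if 65 ≤ c.toNat ∧ c.toNat ≤ 90 then Char.ofNat (c.toNat + 32) else c := by
  unfold PySem.Chars.lowerChar PySem.Chars.isupper
  have hA : ('A' ≤ c) ↔ 65 ≤ c.toNat := by rw [le_iff_toNat]; rfl
  have hZ : (c ≤ 'Z') ↔ c.toNat ≤ 90 := by rw [le_iff_toNat]; rfl
  by_cases h : 65 ≤ c.toNat ∧ c.toNat ≤ 90 <;> simp [hA, hZ, h]

theorem upperChar_eq (c : Char) :
    PySem.Chars.upperChar c =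
      if 97 ≤ c.toNat ∧ c.toNat ≤ 122 then Char.ofNat (c.toNat - 32) else c := by
  unfold PySem.Chars.upperChar PySem.Chars.islower
  have hA : ('a' ≤ c) ↔ 97 ≤ c.toNat := by rw [le_iff_toNat]; rfl
  have hZ : (c ≤ 'z') ↔ c.toNat ≤ 122 := by rw [le_iff_toNat]; rfl
  by_cases h : 97 ≤ c.toNat ∧ c.toNat ≤ 122 <;> simp [hA, hZ, h]

theorem upperChar_lowerChar (c : Char) :
    PySem.Chars.upperChar (PySem.Chars.lowerChar c) = PySem.Chars.upperChar c := by
  by_cases h : 65 ≤ c.toNat ∧ c.toNat ≤ 90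
  · have ht : (Char.ofNat (c.toNat + 32)).toNat = c.toNat + 32 :=
      toNat_ofNat_valid _ (Or.inl (by omega))
    rw [lowerChar_eq c, if_pos h, upperChar_eq, upperChar_eq c, ht,
      if_pos (by omega), if_neg (by omega)]
    have h2 : c.toNat + 32 - 32 = c.toNat := by omega
    rw [h2, Char.ofNat_toNat]
  · rw [lowerChar_eq c, if_neg h]


theorem lowerChar_lowerChar (c : Char) :
    PySem.Chars.lowerChar (PySem.Chars.lowerChar c) = PySem.Chars.lowerChar c := by
  by_cases h : 65 ≤ c.toNat ∧ c.toNat ≤ 90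
  · have ht : (Char.ofNat (c.toNat + 32)).toNat = c.toNat + 32 :=
      toNat_ofNat_valid _ (Or.inl (by omega))
    rw [lowerChar_eq c, if_pos h, lowerChar_eq, ht, if_neg (by omega)]
  · rw [lowerChar_eq c, if_neg h, lowerChar_eq, if_neg h]

theorem capitalize_lower (w : String) :
    pyCapitalize (PySem.Str.lower w) = pyCapitalize w := by
  unfold pyCapitalize
  rw [show (PySem.Str.lower w).toList = PySem.Chars.lower w.toList from PySem.Str.toList_lower w]
  unfold PySem.Chars.lower
  cases w.toList with
  | nil => rfl
  | cons c rest =>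
      unfold pyCapitalizeChars
      simp [upperChar_lowerChar, List.map_map, Function.comp_def, lowerChar_lowerChar]

theorem dropWhile_eq_self_of_all {p : Char → Bool} (l : List Char)
    (h : ∀ c ∈ l, p c = false) : List.dropWhile p l = l := by
  cases l with
  | nil => rfl
  | cons c t => rw [List.dropWhile_cons_of_neg (by simp [h c (by simp)])]

-- every word produced by split₀ is nonempty and whitespace-free
theorem split₀_go_words (s : List Char) :
    ∀ (cur : List Char) (acc : List (List Char)),
      (∀ c ∈ cur, PySem.Chars.isspace c = false) →
      (∀ w ∈ acc, w ≠ [] ∧ ∀ c ∈ w, PySem.Chars.isspace c = false) →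
      ∀ w ∈ PySem.Chars.split₀.go s cur acc,
        w ≠ [] ∧ ∀ c ∈ w, PySem.Chars.isspace c = false := by
  induction s with
  | nil =>
      intro cur acc hcur hacc w hw
      simp only [PySem.Chars.split₀.go] at hw
      by_cases hc : cur.isEmpty
      · rw [if_pos hc, List.mem_reverse] at hw
        exact hacc w hw
      · rw [if_neg hc, List.mem_reverse, List.mem_cons] at hw
        rcases hw with hw | hw
        · subst hw
          refine ⟨by simpa [List.isEmpty_iff] using hc, ?_⟩
          intro c hc'
          exact hcur c (List.mem_reverse.mp hc')
        · exact hacc w hw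
  | cons c rest ih =>
      intro cur acc hcur hacc w hw
      simp only [PySem.Chars.split₀.go] at hw
      by_cases hs : PySem.Chars.isspace c
      · rw [if_pos hs] at hw
        by_cases hc : cur.isEmpty
        · rw [if_pos hc] at hw
          exact ih [] acc (by simp) hacc w hw
        · rw [if_neg hc] at hw
          refine ih [] (cur.reverse :: acc) (by simp) ?_ w hw
          intro v hv
          rcases List.mem_cons.mp hv with hv | hv
          · subst hv
            refine ⟨by simpa [List.isEmpty_iff] using hc, ?_⟩
            intro d hd
            exact hcur d (List.mem_reverse.mp hd)
          · exact hacc v hv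
      · rw [if_neg hs] at hw
        refine ih (c :: cur) acc ?_ hacc w hw
        intro d hd
        rcases List.mem_cons.mp hd with hd | hd
        · subst hd; simpa using hs
        · exact hcur d hd

theorem split₀_words (s : List Char) :
    ∀ w ∈ PySem.Chars.split₀ s, w ≠ [] ∧ ∀ c ∈ w, PySem.Chars.isspace c = false := by
  exact split₀_go_words s [] [] (by simp) (by simp)

theorem isspace_false_of_range (c : Char) (h1 : 65 ≤ c.toNat) (h2 : c.toNat ≤ 122) :
    PySem.Chars.isspace c = false := by
  unfold PySem.Chars.isspace
  simp only [Bool.or_eq_false_iff, Bool.and_eq_false_iff, decide_eq_false_iff_not]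
  omega

theorem isspace_upperChar (c : Char) :
    PySem.Chars.isspace (PySem.Chars.upperChar c) = PySem.Chars.isspace c := by
  by_cases h : 97 ≤ c.toNat ∧ c.toNat ≤ 122
  · have ht : (Char.ofNat (c.toNat - 32)).toNat = c.toNat - 32 :=
      toNat_ofNat_valid _ (Or.inl (by omega))
    rw [upperChar_eq, if_pos h, isspace_false_of_range _ (by omega) (by omega),
      isspace_false_of_range c (by omega) (by omega)]
  · rw [upperChar_eq, if_neg h]

theorem isspace_lowerChar (c : Char) :
    PySem.Chars.isspace (PySem.Chars.lowerChar c) = PySem.Chars.isspace c := by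
  by_cases h : 65 ≤ c.toNat ∧ c.toNat ≤ 90
  · have ht : (Char.ofNat (c.toNat + 32)).toNat = c.toNat + 32 :=
      toNat_ofNat_valid _ (Or.inl (by omega))
    rw [lowerChar_eq, if_pos h, isspace_false_of_range _ (by omega) (by omega),
      isspace_false_of_range c (by omega) (by omega)]
  · rw [lowerChar_eq, if_neg h]

theorem capitalizeChars_good (w : List Char) (h1 : w ≠ [])
    (h2 : ∀ c ∈ w, PySem.Chars.isspace c = false) :
    pyCapitalizeChars w ≠ [] ∧ ∀ c ∈ pyCapitalizeChars w, PySem.Chars.isspace c = false := by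
  cases w with
  | nil => exact absurd rfl h1
  | cons c rest =>
      refine ⟨by simp [pyCapitalizeChars], ?_⟩
      intro d hd
      simp only [pyCapitalizeChars, List.mem_cons, List.mem_map] at hd
      rcases hd with hd | ⟨e, he, hd⟩
      · subst hd; rw [isspace_upperChar]; exact h2 c (by simp)
      · subst hd; rw [isspace_lowerChar]; exact h2 e (by simp [he])

theorem join_good (parts : List (List Char)) (hp : parts ≠ [])
    (h : ∀ w ∈ parts, w ≠ [] ∧ ∀ c ∈ w, PySem.Chars.isspace c = false) :
    PySem.Chars.join [' '] parts ≠ [] ∧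
      List.dropWhile PySem.Chars.isspace (PySem.Chars.join [' '] parts) =
        PySem.Chars.join [' '] parts ∧
      List.dropWhile PySem.Chars.isspace (PySem.Chars.join [' '] parts).reverse =
        (PySem.Chars.join [' '] parts).reverse := by
  induction parts with
  | nil => exact absurd rfl hp
  | cons p ps ih =>
      cases ps with
      | nil =>
          have hgood := h p (by simp)
          have hall : ∀ c ∈ p, PySem.Chars.isspace c = false := hgood.2
          refine ⟨by simpa [PySem.Chars.join, List.intercalate] using hgood.1, ?_, ?_⟩
          · rw [show PySem.Chars.join [' '] [p] = p by simp [PySem.Chars.join, List.intercalate]]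
            exact dropWhile_eq_self_of_all p hall
          · rw [show PySem.Chars.join [' '] [p] = p by simp [PySem.Chars.join, List.intercalate]]
            exact dropWhile_eq_self_of_all p.reverse (fun c hc => hall c (List.mem_reverse.mp hc))
      | cons q qs =>
          have hT := ih (by simp) (fun w hw => h w (List.mem_cons_of_mem p hw))
          have hgood := h p (by simp)
          rw [PySem.Chars.join_cons_cons]
          have hTne : PySem.Chars.join [' '] (q :: qs) ≠ [] := hT.1
          constructor
          · simp [hgood.1]
          constructor
          · -- left strip: dropWhile over p ++ [' '] ++ T, p has no space and is nonempty
            rw [List.append_assoc, List.dropWhile_append]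
            rw [dropWhile_eq_self_of_all p hgood.2]
            rw [if_neg (by simpa [List.isEmpty_iff] using hgood.1), ← List.append_assoc]
          · -- right strip
            have hX : (p ++ [' '] ++ PySem.Chars.join [' '] (q :: qs)).reverse
                = (PySem.Chars.join [' '] (q :: qs)).reverse ++ (' ' :: p.reverse) := by simp
            rw [hX, List.dropWhile_append, hT.2.2,
              if_neg (by simpa [List.isEmpty_iff] using hTne)]

theorem strip_join (parts : List (List Char))
    (h : ∀ w ∈ parts, w ≠ [] ∧ ∀ c ∈ w, PySem.Chars.isspace c = false) :
    PySem.Chars.strip (PySem.Chars.join [' '] parts) = PySem.Chars.join [' '] parts := by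
  cases parts with
  | nil => rfl
  | cons p ps =>
      have hg := join_good (p :: ps) (by simp) h
      unfold PySem.Chars.strip PySem.Chars.lstrip PySem.Chars.rstrip
      rw [hg.2.1, hg.2.2, List.reverse_reverse]

-- the tail of both programs agrees on an arbitrary normalized string
theorem tails_eq (n : String) :
    (match get_key_from_value
        [("OR", "Salem"), ("AL", "Montgomery"), ("NJ", "Trenton"), ("CO", "Denver")] n with
      | some v =>
          if v == "" then "Unknown capital city "
          else (get_key_from_value
            [("Oregon", "OR"), ("Alabama", "AL"), ("New Jersey", "NJ"), ("Colorado", "CO")] v).getD ""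
      | none => "Unknown capital city ") =
      PySem.Dict.getD capitalToState n "Unknown capital city " := by
  by_cases h1 : n = "Salem"
  · subst h1; decide
  by_cases h2 : n = "Montgomery"
  · subst h2; decide
  by_cases h3 : n = "Trenton"
  · subst h3; decide
  by_cases h4 : n = "Denver"
  · subst h4; decide
  · have hco : capitalToState = PySem.Dict.mk
        [("Salem", "Oregon"), ("Montgomery", "Alabama"), ("Trenton", "New Jersey"),
          ("Denver", "Colorado")] := by decide
    simp [get_key_from_value, hco, PySem.Dict.getD, PySem.Dict.get?,
      beq_iff_eq, Ne.symm h1, Ne.symm h2, Ne.symm h3, Ne.symm h4]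

-- ===== VERDICT (by name: the statement is the Claim_ definition above) =====
theorem read_from_dict_spec : Claim_equal_read_from_dict := by
  intro key _
  unfold Spec_read_from_dict read_from_dict read_from_dict_alt
  dsimp only
  have hmap : (PySem.Str.split₀ key).map (fun item => pyCapitalize (PySem.Str.lower item)) =
      (PySem.Str.split₀ key).map pyCapitalize :=
    List.map_congr_left (fun w _ => capitalize_lower w)
  rw [hmap]
  have hwords : ∀ w ∈ ((PySem.Str.split₀ key).map pyCapitalize).map String.toList,
      w ≠ [] ∧ ∀ c ∈ w, PySem.Chars.isspace c = false := by
    intro w hw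
    simp only [List.map_map, List.mem_map, Function.comp] at hw
    obtain ⟨v, hv, rfl⟩ := hw
    have hv' : v.toList ∈ PySem.Chars.split₀ key.toList := by
      rw [← PySem.Str.split₀_map_toList]
      exact List.mem_map_of_mem hv
    have hgood := split₀_words key.toList v.toList hv'
    have : (pyCapitalize v).toList = pyCapitalizeChars v.toList := by
      unfold pyCapitalize
      exact String.toList_ofList
    rw [this]
    exact capitalizeChars_good v.toList hgood.1 hgood.2
  have hstrip : PySem.Str.strip
      (PySem.Str.join " " ((PySem.Str.split₀ key).map pyCapitalize)) =
      PySem.Str.join " " ((PySem.Str.split₀ key).map pyCapitalize) := by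
    apply String.toList_inj.mp
    rw [PySem.Str.toList_strip, PySem.Str.toList_join]
    exact strip_join _ hwords
  rw [hstrip]
  exact tails_eq _
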